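-- pv_equiv track=rewrite | github.com/Robert-Granados/Proyecto2_WEB3 | scraper/scraper_static.py | guess_brand_from_name
-- ===== SOURCE A (Python) =====
-- from typing import Optional
--
-- KNOWN_BRANDS = [
--     "ASUS",
--     "ACER",
--     "HP",
--     "DELL",
--     "LENOVO",
--     "APPLE",
--     "SAMSUNG",
--     "LG",
--     "SONY",
--     "MSI",
--     "INTEL",
--     "NVIDIA",
--     "GIGABYTE",
--     "RAZER",
--     "LOGITECH",
--     "CORSAIR",
--     "HYPERX",
--     "THERMALTAKE",
--     "ACER",
--     "KINGSTON",
--     "ADATA",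
--     "CYBERPOWER",
--     "EVGA",
--     "SKYTECH",
--     "PANASONIC",
--     "MICROSOFT",
--     "GOOGLE",
--     "HUAWEI",
--     "XIAOMI",
--     "AMD",
-- ]
--
-- def guess_brand_from_name(name: str | None) -> Optional[str]:
--     if not name:
--         return None
--     upper_name = name.upper()
--     # prefer longer brand names first
--     for brand in sorted(KNOWN_BRANDS, key=len, reverse=True):
--         if brand in upper_name:
--             return brand if brand.isupper() else brand.title()
--     # fallback to first word if uppercase context
--     first = name.split()[0]
--     if first.isupper() and len(first) <= 4:
--         return first
--     return None
-- ===== SOURCE B (Python) =====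
-- from typing import Optional
--
-- KNOWN_BRANDS = [
--     "ASUS", "ACER", "HP", "DELL", "LENOVO", "APPLE", "SAMSUNG", "LG", "SONY",
--     "MSI", "INTEL", "NVIDIA", "GIGABYTE", "RAZER", "LOGITECH", "CORSAIR",
--     "HYPERX", "THERMALTAKE", "ACER", "KINGSTON", "ADATA", "CYBERPOWER",
--     "EVGA", "SKYTECH", "PANASONIC", "MICROSOFT", "GOOGLE", "HUAWEI",
--     "XIAOMI", "AMD",
-- ]
--
-- def guess_brand_from_name(name: str | None) -> Optional[str]:
--     # no per-call sort: one pass over KNOWN_BRANDS keeping the first strictly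
--     # longest matching brand (replace only on strictly greater length, so ties
--     # go to the earliest brand -- exactly the stable length-descending sort's rule)
--     s = name or ""
--     if s == "":
--         return None
--     u = s.upper()
--     best = ""
--     for b in KNOWN_BRANDS:
--         if len(b) > len(best) and b in u:
--             best = b
--     if best:
--         return best if best.isupper() else best.title()
--     first = s.split()[0]
--     return first if first.isupper() and len(first) <= 4 else None
-- ===== Notes on version B (the rewrite author's own statement) =====
-- stated objective: simpler
-- what changed: Replaces A's per-call length-descending sort plus first-match scan by a single accumulator pass over KNOWN_BRANDS that keeps the first strictly-longest matching brand (strict replacement reproduces the stable sort's tie-to-earliest rule).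
import Mathlib
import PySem

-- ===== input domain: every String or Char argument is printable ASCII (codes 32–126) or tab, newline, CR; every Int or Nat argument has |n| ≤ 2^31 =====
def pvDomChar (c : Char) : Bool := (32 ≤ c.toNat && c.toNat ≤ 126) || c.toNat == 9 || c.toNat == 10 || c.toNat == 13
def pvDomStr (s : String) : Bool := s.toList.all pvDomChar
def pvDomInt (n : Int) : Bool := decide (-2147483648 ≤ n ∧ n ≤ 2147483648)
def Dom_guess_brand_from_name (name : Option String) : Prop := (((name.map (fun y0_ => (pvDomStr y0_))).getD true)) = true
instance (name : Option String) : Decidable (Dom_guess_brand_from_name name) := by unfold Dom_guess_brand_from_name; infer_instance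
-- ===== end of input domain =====

-- B drops A's per-call length-descending sort: one accumulator pass over KNOWN_BRANDS keeping
-- the first strictly-longest matching brand (same value; objective: simpler).


-- shared module constant (identical lines in Source A and Source B)
def pvKnownBrands : List String :=
  ["ASUS", "ACER", "HP", "DELL", "LENOVO", "APPLE", "SAMSUNG", "LG", "SONY",
   "MSI", "INTEL", "NVIDIA", "GIGABYTE", "RAZER", "LOGITECH", "CORSAIR",
   "HYPERX", "THERMALTAKE", "ACER", "KINGSTON", "ADATA", "CYBERPOWER",
   "EVGA", "SKYTECH", "PANASONIC", "MICROSOFT", "GOOGLE", "HUAWEI",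
   "XIAOMI", "AMD"]

-- str.isupper(): some cased character and no lowercase one (exact on the ASCII domain)
def pvStrIsupper (s : String) : Bool :=
  (s.toList.any (fun c => PySem.Chars.isupper c || PySem.Chars.islower c)) &&
  (s.toList.all (fun c => !PySem.Chars.islower c))

-- str.title(): uppercase a letter after a non-letter, lowercase a letter after a letter (exact on ASCII)
def pvTitleChars (prevAlpha : Bool) : List Char → List Char
  | [] => []
  | c :: cs =>
    if PySem.Chars.isalpha c then
      (if prevAlpha then PySem.Chars.lowerChar c else PySem.Chars.upperChar c) :: pvTitleChars true cs
    else c :: pvTitleChars false cs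

def pvTitle (s : String) : String := String.ofList (pvTitleChars false s.toList)

-- ===== PORT A =====
-- A's 'brand if brand.isupper() else brand.title()'
def pvFormatBrand (brand : String) : String := if pvStrIsupper brand then brand else pvTitle brand

-- A's fallback block 'first = name.split()[0]; …';
-- name.split() == [] is Python's IndexError, excluded by Pre_
def pvFallback (name : String) : Option String :=
  match PySem.Str.split₀ name with
  | [] => none
  | first :: _ => if pvStrIsupper first && decide (PySem.Str.len first ≤ 4) then some first else none

def guess_brand_from_name (name : Option String) : Option String :=
  match name with
  | none => none
  | some s =>
    if s = "" then none
    else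
      let upper_name := PySem.Str.upper s
      match (PySem.List.sorted pvKnownBrands (fun b => PySem.Str.len b) true).find?
              (fun brand => PySem.Str.isIn brand upper_name) with
      | some brand => some (pvFormatBrand brand)
      | none => pvFallback s

-- ===== PORT B =====
-- B's 'for b in KNOWN_BRANDS: if len(b) > len(best) and b in u: best = b' loop
def pvBestBrand (u : String) : List String → String → String
  | [], best => best
  | b :: rest, best =>
      pvBestBrand u rest
        (if decide (PySem.Str.len best < PySem.Str.len b) && PySem.Str.isIn b u then b else best)

def guess_brand_from_name_alt (name : Option String) : Option String :=
  let s := name.getD ""          -- s = name or ""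
  if s = "" then none
  else
    let best := pvBestBrand (PySem.Str.upper s) pvKnownBrands ""
    if best ≠ "" then
      some (if pvStrIsupper best then best else pvTitle best)
    else
      -- first = s.split()[0]; split() == [] is Python's IndexError, excluded by Pre_
      match PySem.Str.split₀ s with
      | [] => none
      | first :: _ =>
        if pvStrIsupper first && decide (PySem.Str.len first ≤ 4) then some first else none

-- ===== PRECONDITION & SPEC =====
-- Pre_ excludes exactly the inputs where A raises IndexError (name.split()[0] on a non-empty
-- whitespace-only name containing no known brand); B raises there as well.
def Pre_guess_brand_from_name (name : Option String) : Prop :=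
  (name.map (fun s => s == "" || !(PySem.Str.split₀ s).isEmpty ||
      pvKnownBrands.any (fun b => PySem.Str.isIn b (PySem.Str.upper s)))).getD true = true
instance (name : Option String) : Decidable (Pre_guess_brand_from_name name) := by
  unfold Pre_guess_brand_from_name; infer_instance

def pvWitness_guess_brand_from_name : Option String := some "ASUS laptop"

def Spec_guess_brand_from_name (name : Option String) (out : Option String) : Prop := out = guess_brand_from_name_alt name
instance (name : Option String) (out : Option String) : Decidable (Spec_guess_brand_from_name name out) := by unfold Spec_guess_brand_from_name; infer_instance

-- ===== CLAIM (what is proved, stated in full; the proofs are below) =====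
def Claim_equal_guess_brand_from_name : Prop := ∀ (name : Option String), Dom_guess_brand_from_name name → Pre_guess_brand_from_name name → Spec_guess_brand_from_name name (guess_brand_from_name name)

-- ===== LEMMAS AND PROOFS =====

-- the step of Python's max(key=len) (first maximal element)
def pvMaxStep (acc : Option String) (y : String) : Option String :=
  match acc with
  | none => some y
  | some m => if PySem.Str.len m < PySem.Str.len y then some y else some m

-- inserting a non-matching element does not change find?
theorem pv_find?_insertBy_neg {α : Type} (bef : α → α → Bool) (x : α) (p : α → Bool)
    (hx : p x = false) : ∀ ys : List α, (PySem.List.insertBy bef x ys).find? p = ys.find? p := by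
  intro ys
  induction ys with
  | nil => simp [PySem.List.insertBy, List.find?, hx]
  | cons y ys ih =>
    simp only [PySem.List.insertBy]
    by_cases h : bef x y = true
    · simp [h, List.find?, hx]
    · simp only [h]
      by_cases hy : p y = true <;> simp [List.find?, hy, ih]

-- inserting a matching element into a key-descending list: the first match is the old first
-- match if it is at least as long, else the new element
theorem pv_find?_insertBy_pos {α κ : Type} [LinearOrder κ] (key : α → κ) (x : α) (p : α → Bool)
    (hx : p x = true) : ∀ ys : List α, ys.Pairwise (fun a b => key b ≤ key a) →
    (PySem.List.insertBy (fun a b => decide (key b < key a)) x ys).find? p =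
      (match ys.find? p with
       | none => some x
       | some m => if key x ≤ key m then some m else some x) := by
  intro ys
  induction ys with
  | nil => simp [PySem.List.insertBy, List.find?, hx]
  | cons y ys ih =>
    intro hpw
    rcases List.pairwise_cons.mp hpw with ⟨hy, htl⟩
    simp only [PySem.List.insertBy]
    by_cases h : key y < key x
    · simp only [h, decide_true, if_true, List.find?, hx]
      by_cases hpy : p y = true
      · simp [hpy, not_le.mpr h]
      · simp only [hpy]
        cases hm : List.find? p ys with
        | none => simp
        | some m =>
          have hmem := List.mem_of_find?_eq_some hm
          have : key m ≤ key y := hy m hmem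
          have : ¬ key x ≤ key m := not_le.mpr (lt_of_le_of_lt this h)
          simp [this]
    · simp only [h, decide_false, List.find?]
      by_cases hpy : p y = true
      · simp [hpy, le_of_not_gt h]
      · simp [hpy, ih htl]

-- Python's max(key) over a list with one element appended
theorem pv_max?_append_singleton {α κ : Type} [LinearOrder κ] (key : α → κ) (x : α)
    (M : List α) : PySem.List.max? (M ++ [x]) key =
      (match PySem.List.max? M key with
       | none => some x
       | some m => if key m < key x then some x else some m) := by
  simp only [PySem.List.max?, List.foldl_append, List.foldl_cons, List.foldl_nil]
  cases (List.foldl (fun acc y => match acc with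
      | none => some y
      | some m => if key m < key y then some y else some m) (none : Option α) M) with
  | none => rfl
  | some m => rfl

-- A-side bridge: first match in the stable length-descending sort = first longest match
theorem pv_find?_sorted_eq_max?_filter {α κ : Type} [LinearOrder κ] (key : α → κ)
    (p : α → Bool) (L : List α) :
    (PySem.List.sorted L key true).find? p = PySem.List.max? (L.filter p) key := by
  induction L using List.reverseRecOn with
  | nil => simp [PySem.List.sorted_rev_eq_foldl_insertBy, PySem.List.max?]
  | append_singleton L x ih =>
    have hsort : PySem.List.sorted (L ++ [x]) key true =
        PySem.List.insertBy (fun a b => decide (key b < key a)) x (PySem.List.sorted L key true) := by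
      simp [PySem.List.sorted_rev_eq_foldl_insertBy]
    rw [hsort, List.filter_append]
    by_cases hx : p x = true
    · rw [pv_find?_insertBy_pos key x p hx _ (PySem.List.sorted_pairwise_rev L key), ih]
      simp only [List.filter_cons, hx, if_true, List.filter_nil,
        pv_max?_append_singleton key x (L.filter p)]
      cases hm : PySem.List.max? (L.filter p) key with
      | none => rfl
      | some m =>
        simp only
        rcases le_or_gt (key x) (key m) with hle | hgt
        · simp [hle, not_lt.mpr hle]
        · simp [not_le.mpr hgt, hgt]
    · rw [pv_find?_insertBy_neg _ x p (by simpa using hx), ih]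
      simp [hx]

-- B-side bridge: the accumulator loop simulates max(key=len) over the matching brands
theorem pv_bestBrand_sim (u : String) :
    ∀ (L : List String) (best : String) (acc : Option String),
      (∀ b ∈ L, 0 < PySem.Str.len b) →
      ((best = "" ∧ acc = none) ∨ acc = some best) →
      ((pvBestBrand u L best = "" ∧
          List.foldl pvMaxStep acc (L.filter (fun b => PySem.Str.isIn b u)) = none) ∨
        List.foldl pvMaxStep acc (L.filter (fun b => PySem.Str.isIn b u)) =
          some (pvBestBrand u L best)) := by
  intro L
  induction L with
  | nil =>
    intro best acc _ hrel
    rcases hrel with ⟨h1, h2⟩ | h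
    · exact Or.inl ⟨by simp [pvBestBrand, h1], by simp [h2]⟩
    · exact Or.inr (by simp [pvBestBrand, h])
  | cons b rest ih =>
    intro best acc hpos hrel
    have hb : 0 < PySem.Str.len b := hpos b (List.mem_cons_self ..)
    have hrest : ∀ x ∈ rest, 0 < PySem.Str.len x := fun x hx => hpos x (List.mem_cons_of_mem _ hx)
    simp only [pvBestBrand, List.filter_cons]
    by_cases hin : PySem.Str.isIn b u = true
    · simp only [hin, if_true, Bool.and_true, List.foldl_cons]
      rcases hrel with ⟨h1, h2⟩ | h
      · subst h1; subst h2
        have hlen : decide (PySem.Str.len "" < PySem.Str.len b) = true := by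
          simp only [decide_eq_true_eq]; simpa [PySem.Str.len] using hb
        simp only [hlen, if_true]
        exact ih b (some b) hrest (Or.inr rfl)
      · subst h
        by_cases hlt : PySem.Str.len best < PySem.Str.len b
        · simp only [hlt, decide_true, if_true, pvMaxStep]
          exact ih b (some b) hrest (Or.inr rfl)
        · simp only [hlt, decide_false, if_false, pvMaxStep]
          exact ih best (some best) hrest (Or.inr rfl)
    · simp only [hin, Bool.and_false]
      exact ih best acc hrest hrel

-- ===== VERDICT (by name: the statement is the Claim_ definition above) =====
theorem guess_brand_from_name_spec : Claim_equal_guess_brand_from_name := by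
  intro name _ hpre
  unfold Spec_guess_brand_from_name
  match name with
  | none => rfl
  | some s =>
    by_cases hs : s = ""
    · simp [guess_brand_from_name, guess_brand_from_name_alt, hs]
    · simp only [guess_brand_from_name, guess_brand_from_name_alt, Option.getD_some, hs,
        if_false]
      rw [pv_find?_sorted_eq_max?_filter]
      have hpos : ∀ b ∈ pvKnownBrands, 0 < PySem.Str.len b := by decide
      have hsim := pv_bestBrand_sim (PySem.Str.upper s) pvKnownBrands "" none hpos
        (Or.inl ⟨rfl, rfl⟩)
      have hmax : PySem.List.max?
          (pvKnownBrands.filter (fun b => PySem.Str.isIn b (PySem.Str.upper s)))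
          (fun b => PySem.Str.len b) =
          List.foldl pvMaxStep none
            (pvKnownBrands.filter (fun b => PySem.Str.isIn b (PySem.Str.upper s))) := by
        simp only [PySem.List.max?]
        congr 1
        funext acc y
        cases acc <;> simp [pvMaxStep, PySem.Str.len]
      rw [hmax]
      rcases hsim with ⟨hbest, hfold⟩ | hfold
      · rw [hfold, hbest]
        simp [pvFallback]
      · rw [hfold]
        have hne : pvBestBrand (PySem.Str.upper s) pvKnownBrands "" ≠ "" := by
          intro h
          have := hfold
          rw [h] at this
          have hmem := PySem.List.max?_mem (by rw [hmax]; exact this)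
          have h0 : 0 < PySem.Str.len "" :=
            hpos "" (List.mem_of_mem_filter hmem)
          simp [PySem.Str.len] at h0
        simp [hne, pvFormatBrand]
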